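-- pv_equiv track=rewrite | github.com/AJIsoviita/Ohjelmointi-1 | Kierrokset/Kierros09/projekti9.7.py | calculate_basket_price
-- ===== SOURCE A (Python) =====
-- def calculate_basket_price(mitka_tuotteet, kauppakori):
--     """Laskee halvimman kauppakorin hinnan
--     :Param: mitka_tuotteet: tuotteet, joiden hinta halutaan saada. kauppakori: Dicti, jossa avaimena kauppa,
--     arvona tuotteen hinta tässä kaupassa, vain halutut tuotteet tässä dictissä.
--     :Return: halvin_kauppa: lista mistä saa halvimmalla. Paras_hinta: mikä on halvin hinta.
--     """
--
--     paras_hinta = 1000000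
--     # Valitaan parhaaksi hinnaksi, niin suuri luku, että varmasti kauppakorin hinta on alle sen.
--     halvin_kauppa = []
--
--     for kauppa in kauppakori:
--
--         if len(kauppakori[kauppa]) == len(mitka_tuotteet):
--             # tutkitaan onko oikea määrä tuotteita
--
--             if sum(kauppakori[kauppa]) < paras_hinta:
--                 # lasketaan halvimman korin hinta
--
--                 paras_hinta= sum(kauppakori[kauppa])
--                 halvin_kauppa.clear()
--                 halvin_kauppa.append(kauppa)
--
--             elif sum(kauppakori[kauppa]) == paras_hinta:
--                 # Jos sama korin hinta toisessakin kaupassa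
--                 halvin_kauppa.append(kauppa)
--
--     return halvin_kauppa, paras_hinta
-- ===== SOURCE B (Python) =====
-- def calculate_basket_price(mitka_tuotteet, kauppakori):
--     valid = [(kauppa, sum(hinnat)) for kauppa, hinnat in kauppakori.items()
--              if len(hinnat) == len(mitka_tuotteet)]
--     paras_hinta = min([1000000] + [s for _, s in valid])
--     halvin_kauppa = [kauppa for kauppa, s in valid if s == paras_hinta]
--     return halvin_kauppa, paras_hinta
-- ===== Notes on version B (the rewrite author's own statement) =====
-- stated objective: simpler
-- what changed: Replaces A's interleaved running-min loop (with clear/append state juggling) by two declarative passes: build the list of valid (shop, total) candidates, take the min with the 1000000 cap folded in, then select the shops attaining it.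
import Mathlib
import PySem

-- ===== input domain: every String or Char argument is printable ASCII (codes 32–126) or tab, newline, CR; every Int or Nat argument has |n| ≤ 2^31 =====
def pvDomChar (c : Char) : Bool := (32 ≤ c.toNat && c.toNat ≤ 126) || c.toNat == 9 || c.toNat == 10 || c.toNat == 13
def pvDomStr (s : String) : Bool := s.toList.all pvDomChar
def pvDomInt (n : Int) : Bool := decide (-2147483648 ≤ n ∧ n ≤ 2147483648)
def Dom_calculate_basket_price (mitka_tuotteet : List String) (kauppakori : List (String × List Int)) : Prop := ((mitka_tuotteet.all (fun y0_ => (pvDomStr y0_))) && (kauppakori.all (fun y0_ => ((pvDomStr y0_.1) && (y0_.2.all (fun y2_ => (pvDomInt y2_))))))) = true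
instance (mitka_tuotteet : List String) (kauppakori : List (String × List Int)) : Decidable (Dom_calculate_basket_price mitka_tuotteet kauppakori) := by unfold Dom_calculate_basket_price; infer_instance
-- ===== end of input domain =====

-- B replaces A's interleaved running-min loop by two declarative passes (collect valid
-- (shop, total) candidates, take the min with the 1000000 cap, select the attainers);
-- same cost, simpler structure.

-- ===== PORT A =====
-- 'for kauppa in kauppakori' over a dict visits its keys in insertion order and
-- 'kauppakori[kauppa]' is that key's value, i.e. iteration over the dict's items
-- (keys of a dict are unique); the dict itself is PySem.Dict.ofList of the assoc list.
def calculate_basket_price (mitka_tuotteet : List String) (kauppakori : List (String × List Int)) : List String × Int :=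
  (PySem.Dict.ofList kauppakori).items.foldl
    (fun (st : List String × Int) it =>
      if it.2.length = mitka_tuotteet.length then
        if it.2.sum < st.2 then ([it.1], it.2.sum)
        else if it.2.sum = st.2 then (st.1 ++ [it.1], st.2)
        else st
      else st)
    ([], 1000000)

-- ===== PORT B =====
-- min([1000000] + sums) is ported as a fold of min over the sums starting from 1000000
-- (exact: the minimum of that nonempty list).
def calculate_basket_price_alt (mitka_tuotteet : List String) (kauppakori : List (String × List Int)) : List String × Int :=
  let valid := ((PySem.Dict.ofList kauppakori).items.filter
      (fun p => p.2.length == mitka_tuotteet.length)).map (fun p => (p.1, p.2.sum))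
  let paras_hinta := (valid.map (·.2)).foldl min (1000000 : Int)
  let halvin_kauppa := (valid.filter (fun p => p.2 == paras_hinta)).map (·.1)
  (halvin_kauppa, paras_hinta)

-- ===== PRECONDITION & SPEC =====
def Spec_calculate_basket_price (mitka_tuotteet : List String) (kauppakori : List (String × List Int)) (out : List String × Int) : Prop := out = calculate_basket_price_alt mitka_tuotteet kauppakori
instance (mitka_tuotteet : List String) (kauppakori : List (String × List Int)) (out : List String × Int) : Decidable (Spec_calculate_basket_price mitka_tuotteet kauppakori out) := by unfold Spec_calculate_basket_price; infer_instance

-- ===== CLAIM (what is proved, stated in full; the proofs are below) =====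
def Claim_equal_calculate_basket_price : Prop := ∀ (mitka_tuotteet : List String) (kauppakori : List (String × List Int)), Dom_calculate_basket_price mitka_tuotteet kauppakori → Spec_calculate_basket_price mitka_tuotteet kauppakori (calculate_basket_price mitka_tuotteet kauppakori)

-- ===== LEMMAS AND PROOFS =====

-- the valid candidates of B, parametrised by the item list and basket size
def bpValid (n : Nat) (L : List (String × List Int)) : List (String × Int) :=
  (L.filter (fun p => p.2.length == n)).map (fun p => (p.1, p.2.sum))

def bpMin (n : Nat) (L : List (String × List Int)) : Int :=
  ((bpValid n L).map (·.2)).foldl min 1000000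

def bpStep (n : Nat) (st : List String × Int) (it : String × List Int) : List String × Int :=
  if it.2.length = n then
    if it.2.sum < st.2 then ([it.1], it.2.sum)
    else if it.2.sum = st.2 then (st.1 ++ [it.1], st.2)
    else st
  else st

lemma foldl_min_le_init (l : List Int) (a : Int) : l.foldl min a ≤ a := by
  induction l generalizing a with
  | nil => simp
  | cons x xs ih => exact le_trans (ih (min a x)) (min_le_left a x)

lemma foldl_min_le_mem {l : List Int} {x : Int} (h : x ∈ l) (a : Int) : l.foldl min a ≤ x := by
  induction l generalizing a with
  | nil => cases h
  | cons y ys ih =>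
    rcases List.mem_cons.1 h with rfl | h'
    · exact le_trans (foldl_min_le_init ys (min a x)) (min_le_right a x)
    · exact ih h' (min a y)

lemma bpValid_append (n : Nat) (L : List (String × List Int)) (x : String × List Int) :
    bpValid n (L ++ [x]) =
      bpValid n L ++ (if x.2.length = n then [(x.1, x.2.sum)] else []) := by
  simp only [bpValid, List.filter_append, List.map_append]
  by_cases h : x.2.length = n <;> simp [h]

lemma bpMin_le (n : Nat) (L : List (String × List Int)) {p : String × Int}
    (hp : p ∈ bpValid n L) : bpMin n L ≤ p.2 :=
  foldl_min_le_mem (List.mem_map_of_mem hp) 1000000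

lemma bp_main (n : Nat) (L : List (String × List Int)) :
    L.foldl (bpStep n) ([], 1000000) =
      (((bpValid n L).filter (fun p => p.2 == bpMin n L)).map (·.1), bpMin n L) := by
  induction L using List.reverseRecOn with
  | nil => simp [bpValid, bpMin]
  | append_singleton L x ih =>
    have hmin : bpMin n (L ++ [x]) =
        if x.2.length = n then min (bpMin n L) x.2.sum else bpMin n L := by
      simp only [bpMin, bpValid_append]
      by_cases h : x.2.length = n <;> simp [h]
    rw [List.foldl_append, ih]
    simp only [List.foldl_cons, List.foldl_nil, bpStep]
    by_cases hv : x.2.length = n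
    · simp only [hv, hmin]
      by_cases hlt : x.2.sum < bpMin n L
      · have hmx : min (bpMin n L) x.2.sum = x.2.sum := min_eq_right (le_of_lt hlt)
        have hnil : (bpValid n L).filter (fun p => p.2 == x.2.sum) = [] := by
          apply List.filter_eq_nil_iff.2
          intro p hp
          have := bpMin_le n L hp
          simp only [beq_iff_eq]
          omega
        simp [hlt, hmx, bpValid_append, hv, List.filter_append, hnil]
      · by_cases heq : x.2.sum = bpMin n L
        · have hmx : min (bpMin n L) x.2.sum = bpMin n L := min_eq_left (le_of_eq heq.symm)
          simp [heq, bpValid_append, hv, List.filter_append]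
        · have hgt : bpMin n L < x.2.sum := by omega
          have hmx : min (bpMin n L) x.2.sum = bpMin n L := min_eq_left (le_of_lt hgt)
          simp only [if_neg hlt, if_neg heq, hmx, bpValid_append, hv,
            List.filter_append, List.map_append]
          have : ([(x.1, x.2.sum)].filter (fun p => p.2 == bpMin n L)) = [] := by
            simp [heq]
          simp [this]
    · simp [hv, hmin, bpValid_append]

-- ===== VERDICT (by name: the statement is the Claim_ definition above) =====
theorem calculate_basket_price_spec : Claim_equal_calculate_basket_price := by
  intro mt kk _
  unfold Spec_calculate_basket_price calculate_basket_price calculate_basket_price_alt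
  have h := bp_main mt.length (PySem.Dict.ofList kk).items
  unfold bpStep at h
  rw [h]
  simp [bpValid, bpMin]
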